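-- pv_equiv track=rewrite | github.com/nmccn/undergrad | CS406 - Algorithms/Project 4 - Pathfinding/alg.py | setup_adjmat
-- ===== SOURCE A (Python) =====
-- def setup_adjmat(num_nodes, num_roads, list_of_roads):
--     count = 0
--     # Restructure each element of the list
--     for i in range(len(list_of_roads)):
--         list_of_roads[i] = list_of_roads[i].split()
--     # Create adjacency matrix
--     adj_matrix = [[None for i in range(int(num_roads))] for j in range(int(num_roads))]
--     # Populate the ajdacency matrix (roads are bi-directional here...?)
--     for i in range(len(list_of_roads)):
--         target = list_of_roads[i][1]
--         for j in range(len(list_of_roads)):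
--             if list_of_roads[j][0] == target:
--                 if list_of_roads[i][2] == list_of_roads[j][2] or list_of_roads[i][3] == list_of_roads[j][3]:
--                     adj_matrix[i][j] = 1
--                     adj_matrix[j][i] = 1
--
--     visited = [False] * int(num_roads)
--     return adj_matrix, visited
-- ===== SOURCE B (Python) =====
-- def setup_adjmat(num_nodes, num_roads, list_of_roads):
--     # Restructure each element of the list (in place, as callers rely on it)
--     for i in range(len(list_of_roads)):
--         list_of_roads[i] = list_of_roads[i].split()
--     n = int(num_roads)
--     adj_matrix = [[None] * n for _ in range(n)]
--     # Index roads by their start endpoint, so each road only examines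
--     # the roads that can actually match instead of scanning all of them.
--     index = {}
--     for j, road in enumerate(list_of_roads):
--         index.setdefault(road[0], []).append(j)
--     for i, ri in enumerate(list_of_roads):
--         for j in index.get(ri[1], []):
--             rj = list_of_roads[j]
--             if ri[2] == rj[2] or ri[3] == rj[3]:
--                 adj_matrix[i][j] = 1
--                 adj_matrix[j][i] = 1
--     return adj_matrix, [False] * n
-- ===== Notes on version B (the rewrite author's own statement) =====
-- stated objective: alternative
-- what changed: B builds a dictionary indexing road numbers by their start endpoint once, so each road looks up only the roads that can actually connect to it instead of A's full inner scan over all roads.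
import Mathlib
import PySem

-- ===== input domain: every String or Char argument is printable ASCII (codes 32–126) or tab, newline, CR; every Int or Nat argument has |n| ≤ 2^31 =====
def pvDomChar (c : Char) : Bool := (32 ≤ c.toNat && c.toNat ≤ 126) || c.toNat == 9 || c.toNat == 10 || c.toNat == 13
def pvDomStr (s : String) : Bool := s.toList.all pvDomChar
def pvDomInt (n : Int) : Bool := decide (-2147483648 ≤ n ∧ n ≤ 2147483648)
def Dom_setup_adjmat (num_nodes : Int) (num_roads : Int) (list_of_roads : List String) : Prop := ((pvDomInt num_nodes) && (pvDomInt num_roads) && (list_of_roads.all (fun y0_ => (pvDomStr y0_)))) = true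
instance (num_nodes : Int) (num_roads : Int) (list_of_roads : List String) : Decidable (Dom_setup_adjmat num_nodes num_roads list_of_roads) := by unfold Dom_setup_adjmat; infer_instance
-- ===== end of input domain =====

-- B replaces A's quadratic inner scan by a dictionary indexing roads by their start
-- endpoint (objective: alternative / faster on sparse matches). Both A and B mutate
-- list_of_roads in place (each element replaced by its .split()); the equivalence
-- proved here is about the return value.

-- shared transliterations of the Python subscript expressions
def pvTs (list_of_roads : List String) : List (List String) := list_of_roads.map PySem.Str.split₀
-- list_of_roads[j][k] after the split loop:
def pvTok (ts : List (List String)) (j : Int) (k : Int) : String :=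
  PySem.List.pyGetD (PySem.List.pyGetD ts j []) k ""
-- adj_matrix[i][j] = 1 (rows are distinct lists, so mutation = replace row i):
def pvSet1 (m : List (List (Option Int))) (i j : Int) : List (List (Option Int)) :=
  PySem.List.pySetD m i (PySem.List.pySetD (PySem.List.pyGetD m i []) j (some 1))

-- ===== PORT A =====
def setup_adjmat (num_nodes : Int) (num_roads : Int) (list_of_roads : List String) : List (List (Option Int)) × List Bool :=
  let ts := list_of_roads.map PySem.Str.split₀
  let n := num_roads.toNat
  let adj0 := List.replicate n (List.replicate n (none : Option Int))
  let adj := (PySem.List.pyRange 0 (PySem.List.len ts) 1).foldl (fun adj i =>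
      let target := pvTok ts i 1
      (PySem.List.pyRange 0 (PySem.List.len ts) 1).foldl (fun adj j =>
        if pvTok ts j 0 = target then
          if pvTok ts i 2 = pvTok ts j 2 ∨ pvTok ts i 3 = pvTok ts j 3 then
            pvSet1 (pvSet1 adj i j) j i
          else adj
        else adj) adj) adj0
  (adj, List.replicate n false)

-- ===== PORT B =====
def setup_adjmat_alt (num_nodes : Int) (num_roads : Int) (list_of_roads : List String) : List (List (Option Int)) × List Bool :=
  let ts := list_of_roads.map PySem.Str.split₀
  let n := num_roads.toNat
  let adj0 := List.replicate n (List.replicate n (none : Option Int))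
  -- index = {}; for j, road in enumerate(...): index.setdefault(road[0], []).append(j)
  let idx : PySem.Dict String (List Int) :=
    (PySem.List.enumerate ts).foldl
      (fun d p => d.modify (PySem.List.pyGetD p.2 0 "") [] (fun b => b ++ [p.1])) PySem.Dict.empty
  let adj := (PySem.List.enumerate ts).foldl (fun adj p =>
      (idx.getD (PySem.List.pyGetD p.2 1 "") []).foldl (fun adj j =>
        let rj := PySem.List.pyGetD ts j []
        if PySem.List.pyGetD p.2 2 "" = PySem.List.pyGetD rj 2 "" ∨
           PySem.List.pyGetD p.2 3 "" = PySem.List.pyGetD rj 3 "" then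
          pvSet1 (pvSet1 adj p.1 j) j p.1
        else adj) adj) adj0
  (adj, List.replicate n false)

-- ===== PRECONDITION & SPEC =====
-- Pre_ is exactly where the Python A returns: every road splits into ≥ 2 tokens; whenever
-- road j's start token equals road i's second token, the tokens A then reads exist (≥ 3,
-- and ≥ 4 when the third tokens differ) and, on a match, both road indices fit in the
-- num_roads × num_roads matrix.
def pvPreOk (num_roads : Int) (roads : List String) : Bool :=
  (List.range (pvTs roads).length).all (fun i =>
    decide (2 ≤ ((pvTs roads).getD i []).length) &&
    (List.range (pvTs roads).length).all (fun j =>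
      !(((pvTs roads).getD j []).getD 0 "" == ((pvTs roads).getD i []).getD 1 "") ||
      (decide (3 ≤ ((pvTs roads).getD i []).length) &&
       decide (3 ≤ ((pvTs roads).getD j []).length) &&
       ((((pvTs roads).getD i []).getD 2 "" == ((pvTs roads).getD j []).getD 2 "") ||
        (decide (4 ≤ ((pvTs roads).getD i []).length) &&
         decide (4 ≤ ((pvTs roads).getD j []).length))) &&
       (!((((pvTs roads).getD i []).getD 2 "" == ((pvTs roads).getD j []).getD 2 "") ||
          (((pvTs roads).getD i []).getD 3 "" == ((pvTs roads).getD j []).getD 3 "")) ||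
        (decide ((i : Int) < num_roads) && decide ((j : Int) < num_roads))))))

def Pre_setup_adjmat (num_nodes : Int) (num_roads : Int) (list_of_roads : List String) : Prop :=
  pvPreOk num_roads list_of_roads = true
instance (num_nodes : Int) (num_roads : Int) (list_of_roads : List String) : Decidable (Pre_setup_adjmat num_nodes num_roads list_of_roads) := by unfold Pre_setup_adjmat; infer_instance

def pvWitness_setup_adjmat : Int × Int × List String := (4, 2, ["a b x y", "b c x z"])

def Spec_setup_adjmat (num_nodes : Int) (num_roads : Int) (list_of_roads : List String) (out : List (List (Option Int)) × List Bool) : Prop := out = setup_adjmat_alt num_nodes num_roads list_of_roads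
instance (num_nodes : Int) (num_roads : Int) (list_of_roads : List String) (out : List (List (Option Int)) × List Bool) : Decidable (Spec_setup_adjmat num_nodes num_roads list_of_roads out) := by unfold Spec_setup_adjmat; infer_instance

-- ===== CLAIM (what is proved, stated in full; the proofs are below) =====
def Claim_equal_setup_adjmat : Prop := ∀ (num_nodes : Int) (num_roads : Int) (list_of_roads : List String), Dom_setup_adjmat num_nodes num_roads list_of_roads → Pre_setup_adjmat num_nodes num_roads list_of_roads → Spec_setup_adjmat num_nodes num_roads list_of_roads (setup_adjmat num_nodes num_roads list_of_roads)

-- ===== LEMMAS AND PROOFS =====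

-- B's start-endpoint index retrieves, for any key, exactly the (increasing) list of
-- road indices whose first token equals that key — i.e. A's inner filter.
lemma pv_idx_getD (ts : List (List String)) (k : String) :
    (((PySem.List.pyRange 0 (PySem.List.len ts) 1).map
        (fun j => (j, PySem.List.pyGetD ts j []))).foldl
      (fun d p => d.modify (PySem.List.pyGetD p.2 0 "") [] (fun b => b ++ [p.1]))
      (PySem.Dict.empty : PySem.Dict String (List Int))).getD k []
    = (PySem.List.pyRange 0 (PySem.List.len ts) 1).filter
        (fun j => decide (pvTok ts j 0 = k)) := by
  rw [List.foldl_map]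
  have h := PySem.Dict.getD_foldl_modify_append
      (((PySem.List.pyRange 0 (PySem.List.len ts) 1).map
        (fun j => (PySem.List.pyGetD (PySem.List.pyGetD ts j []) 0 "", j))))
      (PySem.Dict.empty : PySem.Dict String (List Int)) k
  rw [List.foldl_map] at h
  simp only [PySem.Dict.getD_empty, List.nil_append] at h
  rw [h, List.filter_map]
  simp [pvTok, Function.comp_def, Bool.beq_eq_decide_eq]
  rfl

-- For one road i, B's pass over its bucket equals A's guarded pass over all j.
lemma pv_inner (ts : List (List String)) (i : Int) (adj : List (List (Option Int))) :
    (((((PySem.List.pyRange 0 (PySem.List.len ts) 1).map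
          (fun j => (j, PySem.List.pyGetD ts j []))).foldl
        (fun d p => d.modify (PySem.List.pyGetD p.2 0 "") [] (fun b => b ++ [p.1]))
        (PySem.Dict.empty : PySem.Dict String (List Int))).getD (pvTok ts i 1) []).foldl
      (fun adj j =>
        if pvTok ts i 2 = pvTok ts j 2 ∨ pvTok ts i 3 = pvTok ts j 3 then
          pvSet1 (pvSet1 adj i j) j i
        else adj) adj)
    = (PySem.List.pyRange 0 (PySem.List.len ts) 1).foldl (fun adj j =>
        if pvTok ts j 0 = pvTok ts i 1 then
          if pvTok ts i 2 = pvTok ts j 2 ∨ pvTok ts i 3 = pvTok ts j 3 then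
            pvSet1 (pvSet1 adj i j) j i
          else adj
        else adj) adj := by
  rw [PySem.List.foldl_ite_eq_foldl_filter (fun j => pvTok ts j 0 = pvTok ts i 1)
      (fun adj j =>
        if pvTok ts i 2 = pvTok ts j 2 ∨ pvTok ts i 3 = pvTok ts j 3 then
          pvSet1 (pvSet1 adj i j) j i
        else adj)]
  rw [pv_idx_getD]

-- ===== VERDICT (by name: the statement is the Claim_ definition above) =====
theorem setup_adjmat_spec : Claim_equal_setup_adjmat := by
  intro num_nodes num_roads list_of_roads _ _
  unfold Spec_setup_adjmat setup_adjmat setup_adjmat_alt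
  dsimp only
  congr 1
  rw [PySem.List.enumerate_eq_map_pyRange (list_of_roads.map PySem.Str.split₀) []]
  rw [List.foldl_map]
  apply PySem.List.foldl_congr_mem
  intro adj i _
  dsimp only
  have h := pv_inner (list_of_roads.map PySem.Str.split₀) i adj
  simp only [pvTok] at h ⊢
  exact h.symm
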